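-- pv_equiv track=rewrite | github.com/anonymousperson00/acl_submission | dataset_building/javascript/fetch.py | best_github_urls
-- ===== SOURCE A (Python) =====
-- from typing import Any, Dict, List, Optional, Tuple
--
-- def best_github_urls(refs: List[Dict[str, Any]]) -> Tuple[str, str]:
--     repo_url = ""
--     commit_url = ""
--
--     for r in refs or []:
--         url = (r.get("url") or "").strip()
--         if not url:
--             continue
--
--         if "github.com" not in url:
--             continue
--
--         if "/commit/" in url and not commit_url:
--             commit_url = url
--
--         if not repo_url:
--             parts = url.split("github.com/")[-1].split("/")
--             if len(parts) >= 2: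
--                 repo_url = "https://github.com/" + "/".join(parts[:2]).replace(".git", "")
--
--         if repo_url and commit_url:
--             break
--
--     return repo_url, commit_url
-- ===== SOURCE B (Python) =====
-- def best_github_urls(refs):
--     urls = []
--     for r in (refs or []):
--         u = (r.get("url") or "").strip()
--         if u and "github.com" in u:
--             urls.append(u)
--
--     commit_url = next((u for u in urls if "/commit/" in u), "")
--
--     repo_url = ""
--     for u in urls:
--         parts = u.split("github.com/")[-1].split("/")
--         if len(parts) >= 2:
--             repo_url = "https://github.com/" + "/".join(parts[:2]).replace(".git", "")
--             break
--
--     return repo_url, commit_url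
-- ===== Notes on version B (the rewrite author's own statement) =====
-- stated objective: simpler
-- what changed: A's single interleaved loop with two accumulators and an early break is replaced by one pass that builds the filtered list of stripped github urls followed by two independent first-match scans (next(...) for commit_url, a break-on-first-hit scan for repo_url).
import Mathlib
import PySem

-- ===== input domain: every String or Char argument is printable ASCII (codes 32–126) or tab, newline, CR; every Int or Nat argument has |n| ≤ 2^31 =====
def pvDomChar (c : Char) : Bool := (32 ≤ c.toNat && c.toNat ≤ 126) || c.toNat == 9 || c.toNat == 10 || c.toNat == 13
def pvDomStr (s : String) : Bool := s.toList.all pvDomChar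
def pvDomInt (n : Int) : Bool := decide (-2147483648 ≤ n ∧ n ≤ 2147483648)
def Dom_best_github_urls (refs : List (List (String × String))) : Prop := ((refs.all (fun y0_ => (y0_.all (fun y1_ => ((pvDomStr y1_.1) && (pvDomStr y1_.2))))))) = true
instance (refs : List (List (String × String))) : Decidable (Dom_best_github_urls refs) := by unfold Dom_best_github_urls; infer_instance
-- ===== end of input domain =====

-- B replaces A's single interleaved accumulator-and-break loop by a different decomposition:
-- one pass builds the filtered list of stripped github urls, then two independent first-match
-- scans over it compute commit_url and repo_url (objective: simpler; same return value).

-- ===== PORT A =====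
-- url = (r.get("url") or "").strip()   ('or' only ever replaces a missing/empty value by "";
-- the same expression occurs verbatim in Source B, so port B reuses this helper)
def pvUrlOfA (r : List (String × String)) : String :=
  PySem.Str.strip (((PySem.Dict.mk r).get? "url").getD "")

-- parts = url.split("github.com/")[-1].split("/")   (split never returns [], so [-1] is getLastD)
def pvPartsA (url : String) : List String :=
  (PySem.Str.split? (((PySem.Str.split? url "github.com/").getD []).getLastD "") "/").getD []

-- the for-loop with its two accumulators and the 'if repo_url and commit_url: break'
def pvLoopA : List (List (String × String)) → String → String → String × String
  | [], repo_url, commit_url => (repo_url, commit_url)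
  | r :: rest, repo_url, commit_url =>
    let url := pvUrlOfA r
    if url = "" then pvLoopA rest repo_url commit_url
    else if !(PySem.Str.isIn "github.com" url) then pvLoopA rest repo_url commit_url
    else
      let commit_url' := if PySem.Str.isIn "/commit/" url ∧ commit_url = "" then url else commit_url
      let repo_url' :=
        if repo_url = "" then
          let parts := pvPartsA url
          if 2 ≤ parts.length then
            "https://github.com/" ++ PySem.Str.replace (PySem.Str.join "/" (PySem.List.slice parts none (some 2))) ".git" ""
          else repo_url
        else repo_url
      if repo_url' ≠ "" ∧ commit_url' ≠ "" then (repo_url', commit_url')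
      else pvLoopA rest repo_url' commit_url'

def best_github_urls (refs : List (List (String × String))) : String × String :=
  pvLoopA refs "" ""

-- ===== PORT B =====
def pvKeepB (r : List (String × String)) : Bool :=
  decide (pvUrlOfA r ≠ "") && PySem.Str.isIn "github.com" (pvUrlOfA r)

-- the repo_url loop with its break, as first-match recursion over the filtered urls
def pvRepoScanB : List String → String
  | [] => ""
  | u :: rest =>
    let parts := (PySem.Str.split? (((PySem.Str.split? u "github.com/").getD []).getLastD "") "/").getD []
    if 2 ≤ parts.length then
      "https://github.com/" ++ PySem.Str.replace (PySem.Str.join "/" (PySem.List.slice parts none (some 2))) ".git" ""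
    else pvRepoScanB rest

def best_github_urls_alt (refs : List (List (String × String))) : String × String :=
  let urls := refs.foldl (fun acc r => if pvKeepB r then acc ++ [pvUrlOfA r] else acc) []
  let commit_url := (urls.find? (fun u => PySem.Str.isIn "/commit/" u)).getD ""
  (pvRepoScanB urls, commit_url)

-- ===== PRECONDITION & SPEC =====
def Spec_best_github_urls (refs : List (List (String × String))) (out : String × String) : Prop := out = best_github_urls_alt refs
instance (refs : List (List (String × String))) (out : String × String) : Decidable (Spec_best_github_urls refs out) := by unfold Spec_best_github_urls; infer_instance

-- ===== CLAIM (what is proved, stated in full; the proofs are below) =====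
def Claim_equal_best_github_urls : Prop := ∀ (refs : List (List (String × String))), Dom_best_github_urls refs → Spec_best_github_urls refs (best_github_urls refs)

-- ===== LEMMAS AND PROOFS =====

-- the filtered url list B builds, in filter/map form
def pvGH (refs : List (List (String × String))) : List String :=
  (refs.filter pvKeepB).map pvUrlOfA

theorem pvGH_foldl (refs : List (List (String × String))) :
    refs.foldl (fun acc r => if pvKeepB r then acc ++ [pvUrlOfA r] else acc) [] = pvGH refs := by
  simpa [pvGH] using PySem.List.foldl_append_if pvKeepB pvUrlOfA refs []

-- A's loop, started at any accumulator state, computes B's two first-match scans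
set_option maxHeartbeats 1000000 in
theorem pvLoopA_eq (refs : List (List (String × String))) :
    ∀ repo commit : String,
      pvLoopA refs repo commit =
        ((if repo = "" then pvRepoScanB (pvGH refs) else repo),
         (if commit = "" then ((pvGH refs).find? (fun u => PySem.Str.isIn "/commit/" u)).getD "" else commit)) := by
  induction refs with
  | nil =>
    intro repo commit
    by_cases h1 : repo = "" <;> by_cases h2 : commit = "" <;>
      simp [pvLoopA, pvGH, pvRepoScanB, h1, h2]
  | cons r rest ih =>
    intro repo commit
    by_cases hempty : pvUrlOfA r = ""
    · have hk : pvKeepB r = false := by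
        unfold pvKeepB; rw [hempty]; simp
      rw [show pvLoopA (r :: rest) repo commit = pvLoopA rest repo commit by
        simp [pvLoopA, hempty]]
      rw [ih repo commit]
      simp [pvGH, hk]
    · by_cases hgh : PySem.Str.isIn "github.com" (pvUrlOfA r) = true
      · -- kept url
        have hk : pvKeepB r = true := by
          unfold pvKeepB
          simp only [Bool.and_eq_true, decide_eq_true_eq]
          exact ⟨hempty, hgh⟩
        have hgcons : pvGH (r :: rest) = pvUrlOfA r :: pvGH rest := by
          simp [pvGH, hk]
        have hghn := hgh; simp at hghn
        set url := pvUrlOfA r with hurl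
        set commit' := if PySem.Str.isIn "/commit/" url ∧ commit = "" then url else commit with hc'
        set repo' :=
          (if repo = "" then
            if 2 ≤ (pvPartsA url).length then
              "https://github.com/" ++ PySem.Str.replace (PySem.Str.join "/" (PySem.List.slice (pvPartsA url) none (some 2))) ".git" ""
            else repo
          else repo) with hr'
        have hstep : pvLoopA (r :: rest) repo commit =
            if repo' ≠ "" ∧ commit' ≠ "" then (repo', commit') else pvLoopA rest repo' commit' := by
          simp only [pvLoopA, ← hurl]
          rw [if_neg hempty, if_neg (by simp [hghn])]
        have hscan : pvRepoScanB (pvGH (r :: rest)) =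
            if 2 ≤ (pvPartsA url).length then
              "https://github.com/" ++ PySem.Str.replace (PySem.Str.join "/" (PySem.List.slice (pvPartsA url) none (some 2))) ".git" ""
            else pvRepoScanB (pvGH rest) := by
          rw [hgcons]; simp [pvRepoScanB, pvPartsA, ← hurl]
        have hfind : ((pvGH (r :: rest)).find? (fun u => PySem.Str.isIn "/commit/" u)).getD "" =
            if PySem.Str.isIn "/commit/" url then url
            else ((pvGH rest).find? (fun u => PySem.Str.isIn "/commit/" u)).getD "" := by
          rw [hgcons]
          by_cases hc : PySem.Str.isIn "/commit/" url = true <;>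
            (have hcn := hc; simp at hcn; simp [hcn])
        rw [hstep]
        by_cases hbrk : repo' ≠ "" ∧ commit' ≠ ""
        · rw [if_pos hbrk]
          obtain ⟨hrne, hcne⟩ := hbrk
          refine Prod.ext ?_ ?_
          · by_cases hrepo : repo = ""
            · simp only [hrepo, if_pos rfl, hscan]
              by_cases hp : 2 ≤ (pvPartsA url).length
              · rw [hr']; simp [hrepo, hp]
              · exfalso; apply hrne; rw [hr']; simp [hrepo, hp]
            · simp only [if_neg hrepo]; rw [hr']; simp [hrepo]
          · by_cases hcommit : commit = ""
            · simp only [hcommit, if_pos rfl, hfind]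
              by_cases hcc : PySem.Str.isIn "/commit/" url = true
              · have hccn := hcc; simp at hccn; rw [hc']; simp [hcommit, hccn]
              · have hccn := hcc; simp at hccn; exfalso; apply hcne; rw [hc']; simp [hcommit, hccn]
            · simp only [if_neg hcommit]; rw [hc']; simp [hcommit]
        · rw [if_neg hbrk, ih repo' commit']
          refine Prod.ext ?_ ?_
          · simp only
            by_cases hrepo : repo = ""
            · simp only [hrepo, if_pos rfl, hscan]
              by_cases hp : 2 ≤ (pvPartsA url).length
              · have : repo' = "https://github.com/" ++ PySem.Str.replace (PySem.Str.join "/" (PySem.List.slice (pvPartsA url) none (some 2))) ".git" "" := by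
                  rw [hr']; simp [hrepo, hp]
                rw [this, if_pos hp]
                split <;> simp_all
              · have : repo' = "" := by rw [hr']; simp [hrepo, hp]
                rw [this, if_neg (by omega : ¬ 2 ≤ (pvPartsA url).length)]
                simp
            · have : repo' = repo := by rw [hr']; simp [hrepo]
              rw [this]; simp [hrepo]
          · simp only
            by_cases hcommit : commit = ""
            · simp only [hcommit, if_pos rfl, hfind]
              by_cases hcc : PySem.Str.isIn "/commit/" url = true
              · have hccn := hcc; simp at hccn
                have : commit' = url := by rw [hc']; simp [hcommit, hccn]
                rw [this, if_pos hcc]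
                split <;> simp_all
              · have hccn := hcc; simp at hccn
                have : commit' = "" := by rw [hc']; simp [hcommit, hccn]
                rw [this, if_neg hcc]
                simp
            · have : commit' = commit := by rw [hc']; simp [hcommit]
              rw [this]; simp [hcommit]
      · -- github.com not in url
        have hk : pvKeepB r = false := by
          unfold pvKeepB; rw [eq_false_of_ne_true hgh]; simp
        have hghn := hgh; simp at hghn
        rw [show pvLoopA (r :: rest) repo commit = pvLoopA rest repo commit by
          simp [pvLoopA, hempty, hghn]]
        rw [ih repo commit]
        simp [pvGH, hk]

-- ===== VERDICT (by name: the statement is the Claim_ definition above) =====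
theorem best_github_urls_spec : Claim_equal_best_github_urls := by
  intro refs _
  unfold Spec_best_github_urls best_github_urls best_github_urls_alt
  rw [pvGH_foldl, pvLoopA_eq refs "" ""]
  simp
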